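-- pv_equiv track=rewrite | github.com/hemmer/adventofcode | 2018/day08.py | solution
-- ===== SOURCE A (Python) =====
-- def solution(data):
--     def index(i, depth):
--         num_children, num_metadata = data[i], data[i + 1]
--
--         position = i + 2
--         scores = {}
--         metadata_sum = 0
--         for j in range(1, num_children + 1):
--             position, child_metadata_sum, node_value = index(position, depth + 1)
--             metadata_sum += child_metadata_sum
--             scores[j] = node_value
--
--         metadata = data[position:position + num_metadata]
--
--         if num_children == 0:
--             node_value = sum(metadata)
--         else:
--             node_value = 0
--             for m in metadata:
--                 if m in scores:
--                     node_value += scores[m]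
--
--         metadata_sum += sum(metadata)
--         position += + num_metadata
--         return position, metadata_sum, node_value
--
--     pos, total, score = index(0, 1)
--
--     return total, score
-- ===== SOURCE B (Python) =====
-- def solution(data):
--     # Iterative reparse: explicit stack of frames instead of recursion.
--     total = 0
--     pos = 0
--     stack = []  # frames: [num_children, children_done, num_metadata, child_values]
--     while True:
--         if stack and stack[-1][1] >= stack[-1][0]:
--             nc, _, nm, childvals = stack.pop()
--             meta = data[pos:pos + nm]
--             total += sum(meta)
--             pos += nm
--             if nc == 0:
--                 value = sum(meta)
--             else:
--                 value = sum(childvals[m - 1] for m in meta if 1 <= m <= len(childvals))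
--             if not stack:
--                 return total, value
--             stack[-1][1] += 1
--             stack[-1][3].append(value)
--         else:
--             nc, nm = data[pos], data[pos + 1]
--             pos += 2
--             stack.append([nc, 0, nm, []])
-- ===== Notes on version B (the rewrite author's own statement) =====
-- stated objective: alternative
-- what changed: Replaces the recursive descent (inner function index(i, depth) with a per-node dict of child scores) by a single iterative cursor loop over the data with an explicit stack of frames [num_children, children_done, num_metadata, child_values]; node values are computed at pop time by 1-based indexing into the child-value list instead of a dict lookup.
import Mathlib
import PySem

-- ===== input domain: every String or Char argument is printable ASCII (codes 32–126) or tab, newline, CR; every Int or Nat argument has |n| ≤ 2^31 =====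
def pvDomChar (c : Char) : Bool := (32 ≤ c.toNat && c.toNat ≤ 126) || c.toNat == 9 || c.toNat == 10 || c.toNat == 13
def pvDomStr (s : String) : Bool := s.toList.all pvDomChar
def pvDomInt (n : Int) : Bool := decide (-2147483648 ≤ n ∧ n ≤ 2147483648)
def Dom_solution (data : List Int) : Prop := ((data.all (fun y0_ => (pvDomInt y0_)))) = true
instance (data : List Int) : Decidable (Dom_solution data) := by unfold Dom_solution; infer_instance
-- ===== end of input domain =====

-- B replaces A's recursive descent by an iterative cursor loop with an explicit stack of
-- frames (objective: alternative decomposition, same O(n) cost).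

-- ===== PORT A =====
-- A's inner recursive function index(i, depth); the children for-loop is loopA.
-- Fuel makes the recursion total: it bounds only the recursion depth (data.length + 1 is
-- proved sufficient under Pre_solution); none = IndexError or fuel exhausted (both only
-- outside Pre_solution).
mutual
def idxA (data : List Int) : Nat → Int → Int → Option (Int × Int × Int)
  | 0, _, _ => none
  | f + 1, i, depth =>
    match PySem.List.pyGet? data i, PySem.List.pyGet? data (i + 1) with
    | some num_children, some num_metadata =>
      match loopA data f (PySem.List.pyRange 1 (num_children + 1) 1) (i + 2) 0 PySem.Dict.empty depth with
      | some (position, msum, scores) =>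
        let metadata := PySem.List.slice data (some position) (some (position + num_metadata))
        let node_value : Int :=
          if num_children == 0 then metadata.sum
          else metadata.foldl (fun acc m =>
            match scores.get? m with
            | some s => acc + s
            | none => acc) 0
        some (position + num_metadata, msum + metadata.sum, node_value)
      | none => none
    | _, _ => none
  termination_by f _ _ => (f, 0)

def loopA (data : List Int) : Nat → List Int → Int → Int → PySem.Dict Int Int → Int → Option (Int × Int × PySem.Dict Int Int)
  | _, [], position, msum, scores, _ => some (position, msum, scores)
  | f, j :: js, position, msum, scores, depth =>
    match idxA data f position (depth + 1) with
    | some pcv => loopA data f js pcv.1 (msum + pcv.2.1) (scores.insert j pcv.2.2) depth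
    | none => none
  termination_by f js _ _ _ _ => (f, js.length + 1)
end

def solution (data : List Int) : Int × Int :=
  match idxA data (data.length + 1) 0 1 with
  | some r => (r.2.1, r.2.2)
  | none => (0, 0)

-- ===== PORT B =====
-- B's while-loop; a frame is (num_children, children_done, num_metadata, child_values);
-- the top of the Python stack (stack[-1]) is the head of the list.  Fuel = loop-iteration
-- budget, a totality guard only (2^(32*data.length + 64) is proved sufficient under
-- Pre_solution and Dom_solution); none = IndexError / fuel exhausted.
def runB (data : List Int) : Nat → List (Int × Int × Int × List Int) → Int → Int → Option (Int × Int)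
  | 0, _, _, _ => none
  | f + 1, stack, pos, total =>
    match stack with
    | (nc, done, nm, cvs) :: rest =>
      if nc ≤ done then
        let md := PySem.List.slice data (some pos) (some (pos + nm))
        let total' := total + md.sum
        let pos' := pos + nm
        let value : Int :=
          if nc == 0 then md.sum
          else md.foldl (fun acc m =>
            if 1 ≤ m ∧ m ≤ (cvs.length : Int) then acc + (PySem.List.pyGet? cvs (m - 1)).getD 0
            else acc) 0
        match rest with
        | [] => some (total', value)
        | (pnc, pdone, pnm, pcvs) :: rr =>
            runB data f ((pnc, pdone + 1, pnm, pcvs ++ [value]) :: rr) pos' total'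
      else
        match PySem.List.pyGet? data pos, PySem.List.pyGet? data (pos + 1) with
        | some cnc, some cnm => runB data f ((cnc, 0, cnm, ([] : List Int)) :: stack) (pos + 2) total
        | _, _ => none
    | [] =>
      match PySem.List.pyGet? data pos, PySem.List.pyGet? data (pos + 1) with
      | some cnc, some cnm => runB data f ((cnc, 0, cnm, ([] : List Int)) :: stack) (pos + 2) total
      | _, _ => none

def solution_alt (data : List Int) : Int × Int :=
  match runB data (2 ^ (32 * data.length + 64)) [] 0 0 with
  | some r => r
  | none => (0, 0)

-- ===== PRECONDITION & SPEC =====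
-- Shape checker for the input: every header the parse reaches is read in range (fuel
-- bounds the nesting depth, so unboundedly re-reading inputs are rejected too).
def chkKidsF (step : Int → Option Int) : Nat → Int → Option Int
  | 0, p => some p
  | k + 1, p => (step p).bind (fun q => chkKidsF step k q)

def chkNode (data : List Int) : Nat → Int → Option Int
  | 0, _ => none
  | f + 1, p =>
    match PySem.List.pyGet? data p, PySem.List.pyGet? data (p + 1) with
    | some nc, some nm =>
      (chkKidsF (fun r => chkNode data f r) nc.toNat (p + 2)).map (fun q => q + nm)
    | _, _ => none

-- Pre_solution excludes exactly the inputs on which A raises: an IndexError from an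
-- out-of-range header read, or unbounded recursion (RecursionError) when negative
-- metadata counts make the parse re-read earlier regions forever; B's stack loop
-- likewise raises or diverges there.
def Pre_solution (data : List Int) : Prop :=
  (chkNode data (data.length + 1) 0).isSome = true

instance (data : List Int) : Decidable (Pre_solution data) := by unfold Pre_solution; infer_instance

def pvWitness_solution : List Int := [2, 3, 0, 3, 10, 11, 12, 1, 1, 0, 1, 99, 2, 1, 1, 2]

def Spec_solution (data : List Int) (out : Int × Int) : Prop := out = solution_alt data
instance (data : List Int) (out : Int × Int) : Decidable (Spec_solution data out) := by unfold Spec_solution; infer_instance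

-- ===== CLAIM (what is proved, stated in full; the proofs are below) =====
def Claim_equal_solution : Prop := ∀ (data : List Int), Dom_solution data → Pre_solution data → Spec_solution data (solution data)

-- ===== LEMMAS AND PROOFS =====

-- proof-side name for the kids loop of the checker
def chkKids (data : List Int) (f : Nat) : Nat → Int → Option Int :=
  chkKidsF (fun r => chkNode data f r)

-- B's loop is about to read a new header iff the stack is empty or its top still has
-- children pending.
def okTop : List (Int × Int × Int × List Int) → Prop
  | [] => True
  | (nc, done, _, _) :: _ => done < nc

-- state of B's loop after a whole subtree has been consumed
def contB (data : List Int) (fB : Nat) (S : List (Int × Int × Int × List Int)) (e tm v : Int) : Option (Int × Int) :=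
  match S with
  | [] => some (tm, v)
  | (pnc, pdone, pnm, pcvs) :: rest => runB data fB ((pnc, pdone + 1, pnm, pcvs ++ [v]) :: rest) e tm

-- induction payload for one node (PN) and for a run of k sibling nodes (PK):
-- K is the number of nodes in the region, m/ms the metadata sum, v/vs the node value(s).
def PN (data : List Int) (f : Nat) : Prop :=
  ∀ p e : Int, chkNode data f p = some e →
    ∃ (K : Nat) (m v : Int),
      K ≤ (2 ^ 32) ^ f ∧
      (∀ d : Int, idxA data f p d = some (e, m, v)) ∧
      (∀ (fB : Nat) (S : List (Int × Int × Int × List Int)) (t : Int), okTop S →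
        runB data (2 * K + fB) S p t = contB data fB S e (t + m) v)

def PK (data : List Int) (f : Nat) : Prop :=
  ∀ (k : Nat) (p q : Int), chkKids data f k p = some q →
    ∃ (K : Nat) (ms : Int) (vs : List Int),
      vs.length = k ∧ K ≤ k * (2 ^ 32) ^ f ∧
      (∀ (js : List Int) (ms0 : Int) (sc : PySem.Dict Int Int) (d : Int),
        js.length = k →
        loopA data f js p ms0 sc d =
          some (q, ms0 + ms, (js.zip vs).foldl (fun dd jv => dd.insert jv.1 jv.2) sc)) ∧
      (∀ (fB : Nat) (nc0 done n : Int) (c : List Int) (rest : List (Int × Int × Int × List Int)) (t : Int),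
        (nc0 - done).toNat = k →
        runB data (2 * K + fB) ((nc0, done, n, c) :: rest) p t =
          runB data fB ((nc0, done + (k : Int), n, c ++ vs) :: rest) q (t + ms))

theorem pv_dget (vs : List Int) : ∀ (a m : Int) (sc : PySem.Dict Int Int),
    (((PySem.List.pyRange a (a + vs.length) 1).zip vs).foldl (fun dd jv => dd.insert jv.1 jv.2) sc).get? m =
      if a ≤ m ∧ m < a + (vs.length : Int) then PySem.List.pyGet? vs (m - a) else sc.get? m := by
  induction vs with
  | nil =>
    intro a m sc
    rw [PySem.List.pyRange_one_eq_nil (by simp)]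
    simp
  | cons v vs ih =>
    intro a m sc
    rw [show a + ((v :: vs).length : Int) = a + 1 + (vs.length : Int) by simp [List.length_cons]; omega]
    rw [PySem.List.pyRange_one_cons (by omega)]
    simp only [List.zip_cons_cons, List.foldl_cons]
    rw [ih (a + 1) m (sc.insert a v)]
    rw [PySem.Dict.get?_insert]
    by_cases hma : m = a
    · subst hma
      have h1 : ¬ (m + 1 ≤ m ∧ m < m + 1 + (vs.length : Int)) := by omega
      have h2 : m ≤ m ∧ m < m + 1 + (vs.length : Int) := by omega
      simp only [if_neg h1, if_pos h2]
      simp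
    · by_cases hin : a + 1 ≤ m ∧ m < a + 1 + (vs.length : Int)
      · have h2 : a ≤ m ∧ m < a + 1 + (vs.length : Int) := by omega
        simp only [if_pos hin, if_pos h2]
        have hidx : m - a = (((m - a - 1).toNat : Int)) + 1 := by omega
        rw [hidx, PySem.List.pyGet?_cons_succ]
        congr 1
        omega
      · have h2 : ¬ (a ≤ m ∧ m < a + 1 + (vs.length : Int)) := by omega
        simp only [if_neg hin, if_neg h2, if_neg hma]

-- A computes the node value through the dict of child scores, B by 1-based indexing into
-- the child-value list: the two agree when the dict's keys are exactly 1..len(vs).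
theorem pv_value_eq (vs : List Int) (nc : Int) (hlen : vs.length = nc.toNat) (md : List Int) :
    (if nc == 0 then md.sum
     else md.foldl (fun acc m =>
        match (((PySem.List.pyRange 1 (nc + 1) 1).zip vs).foldl (fun dd jv => dd.insert jv.1 jv.2) PySem.Dict.empty).get? m with
        | some s => acc + s
        | none => acc) 0)
    = (if nc == 0 then md.sum
       else md.foldl (fun acc m =>
           if 1 ≤ m ∧ m ≤ (vs.length : Int) then acc + (PySem.List.pyGet? vs (m - 1)).getD 0 else acc) 0) := by
  by_cases hz : nc = 0
  · simp [hz]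
  · rw [if_neg (by simpa using hz), if_neg (by simpa using hz)]
    apply List.foldl_ext
    intro acc m hm
    by_cases hneg : nc < 0
    · have hvs : vs = [] := List.length_eq_zero_iff.mp (by omega)
      subst hvs
      rw [PySem.List.pyRange_one_eq_nil (by omega)]
      simp only [List.zip_nil_left, List.foldl_nil, PySem.Dict.get?_empty, List.length_nil,
        Nat.cast_zero]
      rw [if_neg (by omega)]
    · have hvl : ((vs.length : Nat) : Int) = nc := by omega
      rw [show nc + 1 = 1 + (vs.length : Int) by omega]
      rw [pv_dget vs 1 m PySem.Dict.empty]
      by_cases hin : 1 ≤ m ∧ m < 1 + (vs.length : Int)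
      · rw [if_pos hin]
        have h1 : 0 ≤ m - 1 := by omega
        have h2 : m - 1 < (vs.length : Int) := by omega
        rw [PySem.List.pyGet?_eq_some_getElem vs h1 h2]
        rw [if_pos (by omega)]
        rfl
      · rw [if_neg hin, PySem.Dict.get?_empty, if_neg (by omega)]

theorem pv_main (data : List Int) (hdom : Dom_solution data) : ∀ f : Nat, PN data f ∧ PK data f := by
  have pk_zero : ∀ (fx : Nat) (p q : Int), chkKids data fx 0 p = some q →
      ∃ (K : Nat) (ms : Int) (vs : List Int),
        vs.length = 0 ∧ K ≤ 0 * (2 ^ 32) ^ fx ∧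
        (∀ (js : List Int) (ms0 : Int) (sc : PySem.Dict Int Int) (d : Int),
          js.length = 0 →
          loopA data fx js p ms0 sc d =
            some (q, ms0 + ms, (js.zip vs).foldl (fun dd jv => dd.insert jv.1 jv.2) sc)) ∧
        (∀ (fB : Nat) (nc0 done n : Int) (c : List Int) (rest : List (Int × Int × Int × List Int)) (t : Int),
          (nc0 - done).toNat = 0 →
          runB data (2 * K + fB) ((nc0, done, n, c) :: rest) p t =
            runB data fB ((nc0, done + ((0:Nat) : Int), n, c ++ vs) :: rest) q (t + ms)) := by
    intro fx p q h
    have hpq : p = q := by simpa [chkKids, chkKidsF] using h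
    subst hpq
    refine ⟨0, 0, [], rfl, by omega, ?_, ?_⟩
    · intro js ms0 sc d hjs
      cases js with
      | nil => simp [loopA]
      | cons j js' => simp at hjs
    · intro fB nc0 done n c rest t _
      simp
  intro f
  induction f with
  | zero =>
    constructor
    · intro p e h
      simp [chkNode] at h
    · intro k p q h
      cases k with
      | zero => exact pk_zero 0 p q h
      | succ k => simp [chkKids, chkKidsF, chkNode] at h
  | succ f ih =>
    have hPN : PN data (f + 1) := by
      intro p e h
      rw [chkNode] at h
      split at h
      case _ nc nm h1 h2 =>
        obtain ⟨q, hq, he⟩ := Option.map_eq_some_iff.mp h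
        obtain ⟨K2, ms2, vs2, hvlen, hKb, hA2, hB2⟩ := ih.2 nc.toNat (p + 2) q hq
        have hncmem : nc ∈ data := PySem.List.mem_of_pyGet?_eq_some data h1
        have hnc31 : nc.toNat ≤ 2 ^ 31 := by
          have := List.all_eq_true.mp hdom nc hncmem
          simp [pvDomInt] at this
          omega
        refine ⟨K2 + 1,
          ms2 + (PySem.List.slice data (some q) (some (q + nm))).sum,
          (if nc == 0 then (PySem.List.slice data (some q) (some (q + nm))).sum
           else (PySem.List.slice data (some q) (some (q + nm))).foldl (fun acc m =>
              if 1 ≤ m ∧ m ≤ (vs2.length : Int) then acc + (PySem.List.pyGet? vs2 (m - 1)).getD 0 else acc) 0),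
          ?_, ?_, ?_⟩
        · have hX : 1 ≤ (2 ^ 32 : Nat) ^ f := Nat.one_le_pow _ _ (by norm_num)
          have hK2' : K2 ≤ 2 ^ 31 * (2 ^ 32 : Nat) ^ f :=
            le_trans hKb (Nat.mul_le_mul_right _ hnc31)
          have hpow : (2 ^ 32 : Nat) ^ (f + 1) = 2 ^ 31 * (2 ^ 32 : Nat) ^ f + 2 ^ 31 * (2 ^ 32 : Nat) ^ f := by
            rw [pow_succ]; ring
          omega
        · intro d
          rw [idxA]
          rw [h1, h2]
          dsimp only
          rw [hA2 (PySem.List.pyRange 1 (nc + 1) 1) 0 PySem.Dict.empty d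
            (by rw [PySem.List.length_pyRange_one]; omega)]
          simp only [zero_add]
          rw [← he]
          rw [pv_value_eq vs2 nc hvlen]
        · intro fB S t hok2
          rw [show 2 * (K2 + 1) + fB = (2 * K2 + (fB + 1)) + 1 by omega]
          cases S with
          | nil =>
            rw [runB, h1, h2]
            dsimp only
            rw [hB2 (fB + 1) nc 0 nm [] [] t (by simp)]
            rw [runB]
            rw [if_pos (by omega)]
            simp only [List.nil_append]
            simp [contB, add_assoc]
          | cons fr rest' =>
            obtain ⟨pnc, pdone, pnm, pcvs⟩ := fr
            have hr : pdone < pnc := hok2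
            rw [runB]
            rw [if_neg (by omega)]
            rw [h1, h2]
            dsimp only
            rw [hB2 (fB + 1) nc 0 nm [] ((pnc, pdone, pnm, pcvs) :: rest') t (by simp)]
            rw [runB]
            rw [if_pos (by omega)]
            simp only [List.nil_append]
            rw [contB, ← he]
            simp [add_assoc]
      all_goals simp at h
    refine ⟨hPN, ?_⟩
    intro k
    induction k with
    | zero => intro p q h; exact pk_zero (f + 1) p q h
    | succ k ihk =>
      intro p q h
      rw [chkKids, chkKidsF] at h
      obtain ⟨q1, hq1, hrest⟩ := Option.bind_eq_some_iff.mp h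
      obtain ⟨K1, m1, v1, hKb1, hA1, hB1⟩ := hPN p q1 hq1
      obtain ⟨K2, ms2, vs2, hvlen, hKb2, hA2, hB2⟩ := ihk q1 q hrest
      refine ⟨K1 + K2, m1 + ms2, v1 :: vs2, by simp [hvlen], ?_, ?_, ?_⟩
      · calc K1 + K2 ≤ (2 ^ 32 : Nat) ^ (f + 1) + k * (2 ^ 32 : Nat) ^ (f + 1) :=
              Nat.add_le_add hKb1 hKb2
          _ = (k + 1) * (2 ^ 32 : Nat) ^ (f + 1) := by ring
      · intro js ms0 sc d hjs
        cases js with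
        | nil => simp at hjs
        | cons j js' =>
          rw [loopA]
          rw [hA1 (d + 1)]
          dsimp only
          rw [hA2 js' (ms0 + m1) (sc.insert j v1) d (by simpa using hjs)]
          simp [add_assoc]
      · intro fB nc0 done n c rest t hcnt
        rw [show 2 * (K1 + K2) + fB = 2 * K1 + (2 * K2 + fB) by omega]
        rw [hB1 (2 * K2 + fB) ((nc0, done, n, c) :: rest) t (by simp [okTop]; omega)]
        rw [contB]
        rw [hB2 fB nc0 (done + 1) n (c ++ [v1]) rest (t + m1) (by omega)]
        have hd : done + 1 + ((k : Nat) : Int) = done + (((k + 1 : Nat)) : Int) := by push_cast; ring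
        simp [add_assoc, hd]

-- ===== VERDICT (by name: the statement is the Claim_ definition above) =====
theorem solution_spec : Claim_equal_solution := by
  intro data hdom hpre
  unfold Spec_solution
  obtain ⟨e, he⟩ := Option.isSome_iff_exists.mp hpre
  obtain ⟨K, m, v, hK, hA, hB⟩ := (pv_main data hdom (data.length + 1)).1 0 e he
  have ha : solution data = (m, v) := by
    unfold solution
    rw [hA 1]
  have hKle : 2 * K ≤ 2 ^ (32 * data.length + 64) := by
    calc 2 * K ≤ 2 * (2 ^ 32 : Nat) ^ (data.length + 1) := by omega
      _ = (2 ^ 32 : Nat) ^ (data.length + 1) * 2 := by ring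
      _ ≤ (2 ^ 32 : Nat) ^ (data.length + 1) * 2 ^ 32 := Nat.mul_le_mul_left _ (by norm_num)
      _ = (2 ^ 32 : Nat) ^ (data.length + 2) := by ring
      _ = 2 ^ (32 * data.length + 64) := by rw [← pow_mul]; congr 1
  have hb : solution_alt data = (m, v) := by
    have hb2 := hB (2 ^ (32 * data.length + 64) - 2 * K) [] 0 trivial
    rw [Nat.add_sub_cancel' hKle] at hb2
    unfold solution_alt
    rw [hb2]
    simp [contB]
  rw [ha, hb]
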